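-- pv_equiv track=rewrite | github.com/Fireboy086/SPGuess | test_snippet.py | find_line_at
-- ===== SOURCE A (Python) =====
-- from typing import List, Tuple
--
-- def find_line_at(lrc_lines: List[Tuple[int, str]], ms: int) -> str:
--     prior = ""
--     for t, text in lrc_lines:
--         if t <= ms:
--             if text:
--                 prior = text
--         else:
--             break
--     return prior
-- ===== SOURCE B (Python) =====
-- def find_line_at(lrc_lines, ms):
--     # find cutoff: index of first entry whose timestamp exceeds ms (linear scan, like A's break)
--     c = 0
--     while c < len(lrc_lines) and lrc_lines[c][0] <= ms:
--         c += 1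
--     # backward search for the last non-empty text before the cutoff
--     for t, text in reversed(lrc_lines[:c]):
--         if text:
--             return text
--     return ""
-- ===== Notes on version B (the rewrite author's own statement) =====
-- stated objective: alternative
-- what changed: A forward-folds a 'last non-empty text' accumulator up to the break; B first finds the cutoff index (first timestamp > ms) and then scans the prefix backwards, returning the first non-empty text it meets.
import Mathlib
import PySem

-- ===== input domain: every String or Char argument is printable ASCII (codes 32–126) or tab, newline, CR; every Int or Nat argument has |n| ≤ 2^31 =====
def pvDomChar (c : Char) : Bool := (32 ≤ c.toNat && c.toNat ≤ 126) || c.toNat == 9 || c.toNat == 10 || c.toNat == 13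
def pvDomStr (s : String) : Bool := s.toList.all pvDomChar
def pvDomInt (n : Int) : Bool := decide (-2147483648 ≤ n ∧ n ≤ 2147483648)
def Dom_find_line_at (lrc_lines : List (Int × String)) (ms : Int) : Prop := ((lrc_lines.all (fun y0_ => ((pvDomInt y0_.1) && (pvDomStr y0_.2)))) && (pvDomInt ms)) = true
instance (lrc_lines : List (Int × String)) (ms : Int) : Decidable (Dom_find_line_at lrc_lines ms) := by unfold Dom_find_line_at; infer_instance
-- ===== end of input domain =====

-- B: find the cutoff index (first timestamp > ms), then scan the prefix backwards for the first non-empty text; alternative traversal, same cost.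
-- ===== PORT A =====
-- the for-loop with its 'prior' accumulator and break
def findLineAtGo (ms : Int) (prior : String) : List (Int × String) → String
  | [] => prior
  | (t, text) :: rest =>
    if t ≤ ms then
      findLineAtGo ms (if text ≠ "" then text else prior) rest
    else
      prior

def find_line_at (lrc_lines : List (Int × String)) (ms : Int) : String :=
  findLineAtGo ms "" lrc_lines

-- ===== PORT B =====
def find_line_at_alt (lrc_lines : List (Int × String)) (ms : Int) : String :=
  -- cutoff prefix: entries before the first timestamp > ms (the while loop in Source B)
  let pre := lrc_lines.takeWhile (fun p => decide (p.1 ≤ ms))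
  -- backward scan of the prefix for the first non-empty text (the reversed for loop)
  match pre.reverse.find? (fun p => decide (p.2 ≠ "")) with
  | some p => p.2
  | none => ""

-- ===== PRECONDITION & SPEC =====
def Spec_find_line_at (lrc_lines : List (Int × String)) (ms : Int) (out : String) : Prop := out = find_line_at_alt lrc_lines ms
instance (lrc_lines : List (Int × String)) (ms : Int) (out : String) : Decidable (Spec_find_line_at lrc_lines ms out) := by unfold Spec_find_line_at; infer_instance

-- ===== CLAIM (what is proved, stated in full; the proofs are below) =====
def Claim_equal_find_line_at : Prop := ∀ (lrc_lines : List (Int × String)) (ms : Int), Dom_find_line_at lrc_lines ms → Spec_find_line_at lrc_lines ms (find_line_at lrc_lines ms)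

-- ===== LEMMAS AND PROOFS =====

-- ===== VERDICT (by name: the statement is the Claim_ definition above) =====
theorem findLineAtGo_eq (ms : Int) : ∀ (l : List (Int × String)) (prior : String),
    findLineAtGo ms prior l =
      match (l.takeWhile (fun p => decide (p.1 ≤ ms))).reverse.find? (fun p => decide (p.2 ≠ "")) with
      | some p => p.2
      | none => prior := by
  intro l
  induction l with
  | nil => intro prior; simp [findLineAtGo]
  | cons hd tl ih =>
    intro prior
    obtain ⟨t, text⟩ := hd
    by_cases h : t ≤ ms
    · simp only [findLineAtGo, List.takeWhile, h, decide_true, List.reverse_cons,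
        List.find?_append, ih]
      by_cases he : text = ""
      · subst he; simp
      · rcases hf : List.find? (fun p : Int × String => !decide (p.2 = ""))
            ((tl.takeWhile (fun p => decide (p.1 ≤ ms))).reverse) with _ | a <;>
          simp [hf, he]
    · simp [findLineAtGo, List.takeWhile, h]

theorem find_line_at_spec : Claim_equal_find_line_at := by
  intro lrc_lines ms _
  unfold Spec_find_line_at find_line_at find_line_at_alt
  rw [findLineAtGo_eq]
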